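-- pv_equiv track=rewrite | github.com/luoxisg/cctvmall | Hermes_Agent/scripts/export_web.py | split_title_and_body
-- ===== SOURCE A (Python) =====
-- from typing import Dict, List, Tuple
--
-- def split_title_and_body(markdown_text: str) -> Tuple[str, str]:
--     lines = markdown_text.splitlines()
--     title = "Dashboard"
--     body_lines: List[str] = []
--     title_found = False
--     skip_disclaimer = False
--
--     for idx, line in enumerate(lines):
--         if not title_found and line.startswith("# "):
--             title = line[2:].strip()
--             title_found = True
--             continue
--
--         if title_found and not skip_disclaimer and line.strip() == "> [!note] Disclaimer":
--             skip_disclaimer = True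
--             continue
--
--         if skip_disclaimer:
--             if line.startswith("> "):
--                 continue
--             if not line.strip():
--                 continue
--             skip_disclaimer = False
--
--         if (
--             "01_Project Dashboard" in line
--             and "05_Risk Commercial Decision Log" in line
--             and "|" in line
--         ):
--             continue
--
--         body_lines.append(line)
--
--     body = "\n".join(body_lines).strip()
--     return title, body
-- ===== SOURCE B (Python) =====
-- from typing import List, Tuple
--
--
-- def _is_table_line(line: str) -> bool:
--     return (
--         "01_Project Dashboard" in line
--         and "05_Risk Commercial Decision Log" in line
--         and "|" in line
--     )
--
--
-- def split_title_and_body(markdown_text: str) -> Tuple[str, str]: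
--     lines = markdown_text.splitlines()
--     title = "Dashboard"
--     body_lines: List[str] = []
--     title_found = False
--     i = 0
--     n = len(lines)
--     while i < n:
--         line = lines[i]
--         if not title_found and line.startswith("# "):
--             title = line[2:].strip()
--             title_found = True
--             i += 1
--             continue
--         if title_found and line.strip() == "> [!note] Disclaimer":
--             i += 1
--             while i < n and (lines[i].startswith("> ") or not lines[i].strip()):
--                 i += 1
--             if i < n:
--                 terminator = lines[i]
--                 if not _is_table_line(terminator):
--                     body_lines.append(terminator)
--                 i += 1
--             continue
--         if not _is_table_line(line):
--             body_lines.append(line)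
--         i += 1
--     return title, "\n".join(body_lines).strip()
-- ===== Notes on version B (the rewrite author's own statement) =====
-- stated objective: alternative
-- what changed: Replaced A's boolean skip_disclaimer state machine (a flag threaded through every iteration) with an index-driven while loop that, on seeing the disclaimer marker, consumes the quoted/blank block in an inner loop and handles the terminating line directly, so no skip flag is carried.
import Mathlib
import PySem

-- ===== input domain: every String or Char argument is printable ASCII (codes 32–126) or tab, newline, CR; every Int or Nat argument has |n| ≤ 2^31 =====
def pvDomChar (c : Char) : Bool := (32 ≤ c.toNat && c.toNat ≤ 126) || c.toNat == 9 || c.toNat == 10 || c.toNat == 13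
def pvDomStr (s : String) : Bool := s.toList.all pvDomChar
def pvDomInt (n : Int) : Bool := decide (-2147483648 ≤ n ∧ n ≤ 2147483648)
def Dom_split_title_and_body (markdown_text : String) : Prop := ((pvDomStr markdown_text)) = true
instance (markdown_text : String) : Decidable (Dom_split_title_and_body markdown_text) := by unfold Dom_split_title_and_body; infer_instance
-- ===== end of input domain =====

-- B replaces A's skip_disclaimer boolean state machine with an index-driven loop that
-- consumes the disclaimer block in an inner loop (objective: alternative decomposition).

-- ===== PORT A =====
-- A's for-loop over lines, as structural recursion over the same state
-- (title, body_lines, title_found, skip_disclaimer).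
def pvALoop : List String → String → List String → Bool → Bool → String × List String
  | [], title, body, _, _ => (title, body)
  | line :: rest, title, body, tf, sk =>
    if !tf && PySem.Str.startswith line "# " then
      pvALoop rest (PySem.Str.strip (PySem.Str.slice line (some 2) none)) body true sk
    else if tf && !sk && (PySem.Str.strip line == "> [!note] Disclaimer") then
      pvALoop rest title body tf true
    else if sk && PySem.Str.startswith line "> " then
      pvALoop rest title body tf sk
    else if sk && (PySem.Str.strip line == "") then
      pvALoop rest title body tf sk
    else if PySem.Str.isIn "01_Project Dashboard" line &&
            PySem.Str.isIn "05_Risk Commercial Decision Log" line &&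
            PySem.Str.isIn "|" line then
      pvALoop rest title body tf false
    else
      pvALoop rest title (body ++ [line]) tf false

def split_title_and_body (markdown_text : String) : String × String :=
  let lines := PySem.Str.splitlines markdown_text
  let r := pvALoop lines "Dashboard" [] false false
  (r.1, PySem.Str.strip (PySem.Str.join "\n" r.2))

-- ===== PORT B =====
def pvIsTable (line : String) : Bool :=
  PySem.Str.isIn "01_Project Dashboard" line &&
  PySem.Str.isIn "05_Risk Commercial Decision Log" line &&
  PySem.Str.isIn "|" line

-- B's inner while loop: skip following lines that start with "> " or are blank.
def pvConsume : List String → List String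
  | [] => []
  | l :: rest =>
    if PySem.Str.startswith l "> " || (PySem.Str.strip l == "") then pvConsume rest
    else l :: rest

theorem pvConsume_length_le (ls : List String) : (pvConsume ls).length ≤ ls.length := by
  induction ls with
  | nil => simp [pvConsume]
  | cons l rest ih => simp only [pvConsume]; split <;> simp; omega

-- B's outer while loop, as recursion on the remaining lines.
def pvBLoop : List String → String → List String → Bool → String × List String
  | [], title, body, _ => (title, body)
  | line :: rest, title, body, tf =>
    if !tf && PySem.Str.startswith line "# " then
      pvBLoop rest (PySem.Str.strip (PySem.Str.slice line (some 2) none)) body true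
    else if tf && (PySem.Str.strip line == "> [!note] Disclaimer") then
      match h : pvConsume rest with
      | [] => (title, body)
      | term :: rest' =>
        if pvIsTable term then pvBLoop rest' title body tf
        else pvBLoop rest' title (body ++ [term]) tf
    else if pvIsTable line then pvBLoop rest title body tf
    else pvBLoop rest title (body ++ [line]) tf
termination_by ls _ _ _ => ls.length
decreasing_by
  all_goals (have := pvConsume_length_le rest; simp_all; try omega)

def split_title_and_body_alt (markdown_text : String) : String × String :=
  let lines := PySem.Str.splitlines markdown_text
  let r := pvBLoop lines "Dashboard" [] false
  (r.1, PySem.Str.strip (PySem.Str.join "\n" r.2))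

-- ===== PRECONDITION & SPEC =====
def Spec_split_title_and_body (markdown_text : String) (out : String × String) : Prop := out = split_title_and_body_alt markdown_text
instance (markdown_text : String) (out : String × String) : Decidable (Spec_split_title_and_body markdown_text out) := by unfold Spec_split_title_and_body; infer_instance

-- ===== CLAIM (what is proved, stated in full; the proofs are below) =====
def Claim_equal_split_title_and_body : Prop := ∀ (markdown_text : String), Dom_split_title_and_body markdown_text → Spec_split_title_and_body markdown_text (split_title_and_body markdown_text)

-- ===== LEMMAS AND PROOFS =====

-- While skip_disclaimer is on, A's loop does exactly what pvConsume plus B's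
-- direct handling of the terminating line does.
theorem pvALoop_skip (ls : List String) (t : String) (b : List String) :
    pvALoop ls t b true true =
      match pvConsume ls with
      | [] => (t, b)
      | term :: rest' =>
        if pvIsTable term then pvALoop rest' t b true false
        else pvALoop rest' t (b ++ [term]) true false := by
  induction ls with
  | nil => simp [pvALoop, pvConsume]
  | cons l rest ih =>
    simp only [pvALoop, pvConsume]
    by_cases h1 : PySem.Str.startswith l "> " = true <;>
      by_cases h2 : PySem.Str.strip l = "" <;>
        simp_all [pvIsTable]

theorem pvALoop_eq_pvBLoop (ls : List String) (t : String) (b : List String) (tf : Bool) :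
    pvALoop ls t b tf false = pvBLoop ls t b tf := by
  fun_induction pvBLoop ls t b tf with
  | case1 => simp [pvALoop]
  | case2 line rest title body tf h ih =>
    rw [pvALoop, if_pos h]; exact ih
  | case3 line rest title body tf h1 h2 h =>
    have htf : tf = true := by revert h2; cases tf <;> simp
    subst htf
    rw [pvALoop, if_neg h1, if_pos (by simpa using h2), pvALoop_skip, h]
  | case4 line rest title body tf h1 h2 term rest' h htab ih =>
    have htf : tf = true := by revert h2; cases tf <;> simp
    subst htf
    rw [pvALoop, if_neg h1, if_pos (by simpa using h2), pvALoop_skip, h]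
    simpa [htab] using ih
  | case5 line rest title body tf h1 h2 term rest' h htab ih =>
    have htf : tf = true := by revert h2; cases tf <;> simp
    subst htf
    rw [pvALoop, if_neg h1, if_pos (by simpa using h2), pvALoop_skip, h]
    simpa [htab] using ih
  | case6 line rest title body tf h1 h2 htab ih =>
    rw [pvALoop, if_neg h1, if_neg (by simpa using h2), ← ih]
    simp [pvIsTable] at htab
    simp [htab]
  | case7 line rest title body tf h1 h2 htab ih =>
    rw [pvALoop, if_neg h1, if_neg (by simpa using h2), ← ih]
    simp [pvIsTable] at htab
    simp
    intro ha hb hc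
    rw [htab ha hb] at hc
    cases hc

-- ===== VERDICT (by name: the statement is the Claim_ definition above) =====
theorem split_title_and_body_spec : Claim_equal_split_title_and_body := by
  intro md _
  simp only [Spec_split_title_and_body, split_title_and_body, split_title_and_body_alt,
    pvALoop_eq_pvBLoop]
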